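-- pv_equiv track=rewrite | github.com/Krandheer/data-structure | leetcode_daily.py | longestNonDecreasing
-- ===== SOURCE A (Python) =====
-- def longestNonDecreasing(nums):
--     n = len(nums)
--     if n == 1:
--         return 1
--
--     left = [1] * n
--     right = [1] * n
--
--     for i in range(1, n):
--         if nums[i] >= nums[i - 1]:
--             left[i] = left[i - 1] + 1
--
--     for i in range(n - 2, -1, -1):
--         if nums[i] <= nums[i + 1]:
--             right[i] = right[i + 1] + 1
--
--     ans = max(left)
--     if ans != n:
--         ans += 1
--     for i in range(1, n - 1):
--         if nums[i - 1] <= nums[i + 1]: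
--             ans = max(ans, left[i - 1] + right[i + 1] + 1)
--     return ans
-- ===== SOURCE B (Python) =====
-- def longestNonDecreasing(nums):
--     n = len(nums)
--     if n == 0:
--         return 0
--     best = 1       # max length of a plain non-decreasing run seen so far
--     bestB = 0      # max length of a run using exactly one interior change
--     keep = 1       # run length ending at current index, no change
--     keep_pp = 0    # run length ending two indices back
--     brg = 0        # run length ending at current index with one changed interior element
--     for i in range(1, n):
--         if nums[i] >= nums[i - 1]:
--             new_keep = keep + 1
--             brg = brg + 1 if brg else 0
--         else:
--             new_keep = 1
--             brg = 0
--         if i >= 2 and nums[i - 2] <= nums[i]: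
--             brg = max(brg, keep_pp + 2)
--         keep_pp, keep = keep, new_keep
--         best = max(best, keep)
--         bestB = max(bestB, brg)
--     if best != n:
--         best += 1
--     return max(best, bestB)
-- ===== Notes on version B (the rewrite author's own statement) =====
-- stated objective: alternative
-- what changed: A builds two length-n arrays (left/right run lengths) in three index loops and then scans for bridge candidates; B is a single forward pass keeping just two running run lengths (plain run and one-change run) in O(1) extra space.
-- outside the precondition, e.g. on longestNonDecreasing([]): A raises ValueError, B returns 0
import Mathlib
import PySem

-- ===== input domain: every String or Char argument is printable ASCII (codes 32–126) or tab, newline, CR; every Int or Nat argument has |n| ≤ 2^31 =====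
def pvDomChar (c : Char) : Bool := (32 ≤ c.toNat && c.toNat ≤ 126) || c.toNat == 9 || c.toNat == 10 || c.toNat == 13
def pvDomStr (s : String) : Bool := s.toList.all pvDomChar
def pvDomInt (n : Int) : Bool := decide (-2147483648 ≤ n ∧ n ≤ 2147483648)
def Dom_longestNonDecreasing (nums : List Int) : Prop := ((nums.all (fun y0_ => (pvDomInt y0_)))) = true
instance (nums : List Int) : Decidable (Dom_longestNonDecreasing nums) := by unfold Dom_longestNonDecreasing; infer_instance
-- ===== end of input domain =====

-- B replaces A's three index loops and two length-n arrays by a single forward pass keeping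
-- two run lengths (O(1) extra space); equivalence of the return values is proved on Pre_ (nums ≠ []).

-- ===== PORT A =====
def longestNonDecreasing (nums : List Int) : Int :=
  let n : Int := PySem.List.len nums
  if n = 1 then 1
  else
    let left : List Int := PySem.List.pyRepeat [1] n
    let right : List Int := PySem.List.pyRepeat [1] n
    let left := (PySem.List.pyRange 1 n 1).foldl (fun left i =>
      if PySem.List.pyGetD nums i 0 ≥ PySem.List.pyGetD nums (i - 1) 0 then
        PySem.List.pySetD left i (PySem.List.pyGetD left (i - 1) 0 + 1)
      else left) left
    let right := (PySem.List.pyRange (n - 2) (-1) (-1)).foldl (fun right i =>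
      if PySem.List.pyGetD nums i 0 ≤ PySem.List.pyGetD nums (i + 1) 0 then
        PySem.List.pySetD right i (PySem.List.pyGetD right (i + 1) 0 + 1)
      else right) right
    -- max(left): raises ValueError on an empty list, excluded by Pre_
    let ans := (PySem.List.max? left (fun y => y)).getD 0
    let ans := if ans ≠ n then ans + 1 else ans
    (PySem.List.pyRange 1 (n - 1) 1).foldl (fun ans i =>
      if PySem.List.pyGetD nums (i - 1) 0 ≤ PySem.List.pyGetD nums (i + 1) 0 then
        max ans (PySem.List.pyGetD left (i - 1) 0 + PySem.List.pyGetD right (i + 1) 0 + 1)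
      else ans) ans

-- ===== PORT B =====
def longestNonDecreasing_alt (nums : List Int) : Int :=
  let n : Int := PySem.List.len nums
  if n = 0 then 0
  else
    let st := (PySem.List.pyRange 1 n 1).foldl
      (fun (st : Int × Int × Int × Int × Int) i =>
        let best := st.1
        let bestB := st.2.1
        let keep := st.2.2.1
        let keep_pp := st.2.2.2.1
        let brg := st.2.2.2.2
        let p :=
          if PySem.List.pyGetD nums i 0 ≥ PySem.List.pyGetD nums (i - 1) 0 then
            (keep + 1, if brg ≠ 0 then brg + 1 else 0)
          else (1, 0)
        let brg2 :=
          if 2 ≤ i ∧ PySem.List.pyGetD nums (i - 2) 0 ≤ PySem.List.pyGetD nums i 0 then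
            max p.2 (keep_pp + 2)
          else p.2
        (max best p.1, max bestB brg2, p.1, keep, brg2))
      ((1 : Int), (0 : Int), (1 : Int), (0 : Int), (0 : Int))
    let best := if st.1 ≠ n then st.1 + 1 else st.1
    max best st.2.1

-- ===== PRECONDITION & SPEC =====
-- Pre_ excludes only the empty list, on which A's max(left) raises ValueError.
def Pre_longestNonDecreasing (nums : List Int) : Prop := nums ≠ []
instance (nums : List Int) : Decidable (Pre_longestNonDecreasing nums) := by
  unfold Pre_longestNonDecreasing; infer_instance
def pvWitness_longestNonDecreasing : List Int := [1, 3, 2, 4]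

def Spec_longestNonDecreasing (nums : List Int) (out : Int) : Prop := out = longestNonDecreasing_alt nums
instance (nums : List Int) (out : Int) : Decidable (Spec_longestNonDecreasing nums out) := by
  unfold Spec_longestNonDecreasing; infer_instance

-- ===== CLAIM (what is proved, stated in full; the proofs are below) =====
def Claim_equal_longestNonDecreasing : Prop := ∀ (nums : List Int), Dom_longestNonDecreasing nums → Pre_longestNonDecreasing nums → Spec_longestNonDecreasing nums (longestNonDecreasing nums)

-- ===== LEMMAS AND PROOFS =====

-- value at index i (all loop indices stay in bounds, so the default is never read)
def pva (nums : List Int) (i : ℕ) : ℤ := nums.getD i 0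

-- length of the non-decreasing run ending at i  (A's left[i])
def pvf (nums : List Int) : ℕ → ℤ
  | 0 => 1
  | i + 1 => if pva nums i ≤ pva nums (i + 1) then pvf nums i + 1 else 1

-- length of the non-decreasing run starting at i, inside [0, n)  (A's right[i])
def pvr (nums : List Int) (n : ℕ) (q : ℕ) : ℤ :=
  if h : q + 1 < n ∧ pva nums q ≤ pva nums (q + 1) then pvr nums n (q + 1) + 1 else 1
  termination_by n - q
  decreasing_by omega

-- B's bridged-run value brg after step i
def pvg (nums : List Int) : ℕ → ℤ
  | 0 => 0
  | i + 1 =>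
    if 1 ≤ i ∧ pva nums (i - 1) ≤ pva nums (i + 1) then
      max (if pva nums i ≤ pva nums (i + 1) ∧ pvg nums i ≠ 0 then pvg nums i + 1 else 0)
        (pvf nums (i - 1) + 2)
    else
      (if pva nums i ≤ pva nums (i + 1) ∧ pvg nums i ≠ 0 then pvg nums i + 1 else 0)

-- nums is non-decreasing on positions s..t
def pvSeg (nums : List Int) (s : ℕ) : ℕ → Bool
  | 0 => true
  | t + 1 => if s ≤ t then (decide (pva nums t ≤ pva nums (t + 1))) && pvSeg nums s t else true

-- the common two-index family: run p+1..i with element p changed, prefix run glued on the left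
def pvh (nums : List Int) (n p i : ℕ) : ℤ :=
  if 1 ≤ p ∧ p + 1 ≤ i ∧ i < n ∧ pva nums (p - 1) ≤ pva nums (p + 1) ∧ pvSeg nums (p + 1) i
  then pvf nums (p - 1) + 1 + ((i - p : ℕ) : ℤ) else 0

-- A's bridge candidate at p
def pvb (nums : List Int) (n p : ℕ) : ℤ :=
  if 1 ≤ p ∧ p + 1 < n ∧ pva nums (p - 1) ≤ pva nums (p + 1)
  then pvf nums (p - 1) + pvr nums n (p + 1) + 1 else 0

-- max of a list of integers, from 0
def pvMx (l : List ℤ) : ℤ := l.foldl max 0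

lemma pvMx_nil : pvMx [] = 0 := rfl

lemma foldl_max_init (l : List ℤ) (a b : ℤ) :
    l.foldl max (max a b) = max a (l.foldl max b) := by
  induction l generalizing b with
  | nil => rfl
  | cons x t ih =>
    simp only [List.foldl_cons, max_assoc]
    exact ih (max b x)

lemma pvMx_cons (x : ℤ) (l : List ℤ) : pvMx (x :: l) = max x (pvMx l) := by
  simp only [pvMx, List.foldl_cons]
  rw [max_comm 0 x, foldl_max_init]

lemma pvMx_nonneg (l : List ℤ) : 0 ≤ pvMx l := by
  induction l with
  | nil => simp [pvMx]
  | cons x t ih => rw [pvMx_cons]; omega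

lemma pvMx_append (l m : List ℤ) : pvMx (l ++ m) = max (pvMx l) (pvMx m) := by
  induction l with
  | nil => rw [List.nil_append, pvMx_nil, max_eq_right (pvMx_nonneg m)]
  | cons x t ih => rw [List.cons_append, pvMx_cons, pvMx_cons, ih, max_assoc]

lemma pvMx_eq_zero_of {α : Type} (l : List α) (f : α → ℤ) (h : ∀ x ∈ l, f x = 0) :
    pvMx (l.map f) = 0 := by
  induction l with
  | nil => rfl
  | cons x t ih =>
    rw [List.map_cons, pvMx_cons, h x (List.mem_cons_self), ih (fun y hy => h y (List.mem_cons_of_mem _ hy))]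
    omega

-- add a positive constant to every nonzero entry of a nonneg list: the max follows
lemma pvMx_bump {α : Type} (l : List α) (f : α → ℤ) (C : ℤ) (hC : 0 ≤ C)
    (hnn : ∀ x ∈ l, 0 ≤ f x) :
    pvMx (l.map (fun x => if f x = 0 then 0 else C + f x)) =
      if pvMx (l.map f) = 0 then 0 else C + pvMx (l.map f) := by
  induction l with
  | nil => simp [pvMx_nil]
  | cons x t ih =>
    have hx := hnn x (List.mem_cons_self)
    have ht : ∀ y ∈ t, 0 ≤ f y := fun y hy => hnn y (List.mem_cons_of_mem _ hy)
    have h1 := pvMx_nonneg (t.map f)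
    rw [List.map_cons, List.map_cons, pvMx_cons, pvMx_cons, ih ht]
    by_cases h0 : f x = 0 <;> by_cases h2 : pvMx (t.map f) = 0 <;>
      simp [h0, h2] <;> omega

-- max distributes over pointwise max
lemma pvMx_map_max {α : Type} (l : List α) (u v : α → ℤ) :
    pvMx (l.map (fun x => max (u x) (v x))) = max (pvMx (l.map u)) (pvMx (l.map v)) := by
  induction l with
  | nil => simp [pvMx_nil]
  | cons x t ih =>
    simp only [List.map_cons, pvMx_cons, ih]
    omega

-- swap a double max
lemma pvMx_swap {α β : Type} (l : List α) (m : List β) (f : α → β → ℤ) :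
    pvMx (l.map (fun p => pvMx (m.map (f p)))) =
      pvMx (m.map (fun i => pvMx (l.map (fun p => f p i)))) := by
  induction l with
  | nil =>
    rw [List.map_nil, pvMx_nil, pvMx_eq_zero_of]
    intro x _; rw [List.map_nil, pvMx_nil]
  | cons x t ih =>
    rw [List.map_cons, pvMx_cons, ih, ← pvMx_map_max]
    congr 1
    apply List.map_congr_left
    intro i _
    rw [List.map_cons, pvMx_cons]

lemma pvf_pos (nums : List Int) (i : ℕ) : 1 ≤ pvf nums i := by
  cases i with
  | zero => simp [pvf]
  | succ j =>
    rw [pvf]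
    split
    · have := pvf_pos nums j; omega
    · omega

lemma pvr_pos (nums : List Int) (n q : ℕ) : 1 ≤ pvr nums n q := by
  rw [pvr]
  split
  · have := pvr_pos nums n (q + 1); omega
  · omega
  termination_by n - q
  decreasing_by omega

lemma pvg_nonneg (nums : List Int) (i : ℕ) : 0 ≤ pvg nums i := by
  cases i with
  | zero => simp [pvg]
  | succ j =>
    rw [pvg]
    have hf := pvf_pos nums (j - 1)
    have hg := pvg_nonneg nums j
    split <;> split <;> simp <;> omega

lemma pvh_nonneg (nums : List Int) (n p i : ℕ) : 0 ≤ pvh nums n p i := by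
  rw [pvh]
  have := pvf_pos nums (p - 1)
  split <;> omega

lemma pvSeg_self (nums : List Int) (q : ℕ) : pvSeg nums q q = true := by
  cases q with
  | zero => rfl
  | succ t => simp [pvSeg]

-- bottom split of a segment
lemma pvSeg_bot (nums : List Int) (q i : ℕ) (h : q + 1 ≤ i) :
    pvSeg nums q i = ((decide (pva nums q ≤ pva nums (q + 1))) && pvSeg nums (q + 1) i) := by
  induction i with
  | zero => omega
  | succ t ih =>
    have hqt : q ≤ t := by omega
    rw [pvSeg, if_pos hqt]
    rcases Nat.eq_or_lt_of_le hqt with he | hlt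
    · subst he
      simp [pvSeg_self]
    · rw [ih (by omega), pvSeg, if_pos (by omega : q + 1 ≤ t)]
      rw [Bool.and_left_comm]

-- a zero-padded tail does not change the max
lemma pvMx_extend (f : ℕ → ℤ) (i n : ℕ) (hi : i ≤ n)
    (h : ∀ p, i ≤ p → p < n → f p = 0) :
    pvMx ((List.range n).map f) = pvMx ((List.range i).map f) := by
  have hn : n = i + (n - i) := by omega
  have hz : pvMx ((List.range (n - i)).map (fun k => f (i + k))) = 0 := by
    apply pvMx_eq_zero_of
    intro k hk
    rw [List.mem_range] at hk
    exact h (i + k) (by omega) (by omega)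
  rw [hn, List.range_add, List.map_append, pvMx_append, List.map_map]
  simp only [Function.comp_def]
  rw [hz, max_eq_left (pvMx_nonneg _)]

lemma pvh_top (nums : List Int) (n p i : ℕ) (hp : p < i) (hin : i + 1 < n) :
    pvh nums n p (i + 1) =
      if pva nums i ≤ pva nums (i + 1) then
        (if pvh nums n p i = 0 then 0 else 1 + pvh nums n p i) else 0 := by
  have hseg : pvSeg nums (p + 1) (i + 1)
      = ((decide (pva nums i ≤ pva nums (i + 1))) && pvSeg nums (p + 1) i) := by
    rw [pvSeg, if_pos (by omega : p + 1 ≤ i), Bool.and_comm]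
  have hfpos := pvf_pos nums (p - 1)
  by_cases hcur : pva nums i ≤ pva nums (i + 1)
  · rw [if_pos hcur]
    by_cases hc : 1 ≤ p ∧ p + 1 ≤ i ∧ i < n ∧ pva nums (p - 1) ≤ pva nums (p + 1) ∧
        pvSeg nums (p + 1) i = true
    · have h1 : pvh nums n p i = pvf nums (p - 1) + 1 + ((i - p : ℕ) : ℤ) := by
        rw [pvh, if_pos hc]
      have h2 : pvh nums n p (i + 1) = pvf nums (p - 1) + 1 + ((i + 1 - p : ℕ) : ℤ) := by
        rw [pvh, if_pos]
        exact ⟨hc.1, by omega, hin, hc.2.2.2.1, by rw [hseg]; simp [hcur, hc.2.2.2.2]⟩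
      have hnz : pvf nums (p - 1) + 1 + ((i - p : ℕ) : ℤ) ≠ 0 := by
        have : (0:ℤ) ≤ ((i - p : ℕ) : ℤ) := Int.natCast_nonneg _
        omega
      rw [h1, h2, if_neg hnz]
      have : (i + 1 - p : ℕ) = (i - p : ℕ) + 1 := by omega
      rw [this]; push_cast; ring
    · have h1 : pvh nums n p i = 0 := by
        rw [pvh, if_neg]; intro hcc; exact hc ⟨hcc.1, hcc.2.1, hcc.2.2.1, hcc.2.2.2.1, hcc.2.2.2.2⟩
      have h2 : pvh nums n p (i + 1) = 0 := by
        rw [pvh, if_neg]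
        intro hcc
        rw [hseg] at hcc
        simp only [Bool.and_eq_true, decide_eq_true_eq] at hcc
        exact hc ⟨hcc.1, by omega, by omega, hcc.2.2.2.1, hcc.2.2.2.2.2⟩
      rw [h1, h2, if_pos rfl]
  · rw [if_neg hcur, pvh, if_neg]
    intro hcc
    rw [hseg] at hcc
    simp only [Bool.and_eq_true, decide_eq_true_eq] at hcc
    exact hcur hcc.2.2.2.2.1

lemma pvh_diag (nums : List Int) (n i : ℕ) (hin : i + 1 < n) :
    pvh nums n i (i + 1) =
      if 1 ≤ i ∧ pva nums (i - 1) ≤ pva nums (i + 1) then pvf nums (i - 1) + 2 else 0 := by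
  rw [pvh]
  by_cases hc : 1 ≤ i ∧ pva nums (i - 1) ≤ pva nums (i + 1)
  · rw [if_pos hc, if_pos ⟨hc.1, le_refl _, hin, hc.2, pvSeg_self nums (i + 1)⟩]
    have : (i + 1 - i : ℕ) = 1 := by omega
    rw [this]; push_cast; ring
  · rw [if_neg hc, if_neg]
    intro hcc
    exact hc ⟨hcc.1, hcc.2.2.2.1⟩

-- closed form for g (the loop-shape of B's bridged run)
lemma pvg_closed (nums : List Int) (n i : ℕ) (hi : i < n) :
    pvg nums i = pvMx ((List.range i).map (fun p => pvh nums n p i)) := by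
  induction i with
  | zero => simp [pvg, pvMx_nil]
  | succ i ih =>
    have hin : i + 1 < n := hi
    have hiln : i < n := by omega
    rw [List.range_succ, List.map_append, pvMx_append, List.map_cons, List.map_nil,
      pvMx_cons, pvMx_nil, max_eq_left (pvh_nonneg nums n i (i + 1)),
      pvh_diag nums n i hin]
    have hmap : (List.range i).map (fun p => pvh nums n p (i + 1)) =
        (List.range i).map (fun p => if pva nums i ≤ pva nums (i + 1) then
          (if pvh nums n p i = 0 then 0 else 1 + pvh nums n p i) else 0) :=
      List.map_congr_left (fun p hp => pvh_top nums n p i (List.mem_range.mp hp) hin)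
    rw [hmap]
    have hg := pvg_nonneg nums i
    have hf := pvf_pos nums (i - 1)
    by_cases hcur : pva nums i ≤ pva nums (i + 1)
    · simp only [if_pos hcur]
      rw [pvMx_bump (List.range i) (fun p => pvh nums n p i) 1 (by omega)
        (fun p _ => pvh_nonneg nums n p i), ← ih hiln, pvg]
      split_ifs <;> omega
    · simp only [if_neg hcur]
      rw [pvMx_eq_zero_of _ _ (fun p _ => rfl), pvg]
      have : ¬ (pva nums i ≤ pva nums (i + 1) ∧ pvg nums i ≠ 0) := fun hh => hcur hh.1
      split_ifs <;> omega

lemma pvt_nonneg (nums : List Int) (q i : ℕ) :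
    0 ≤ (if q ≤ i ∧ pvSeg nums q i then ((i - q : ℕ) : ℤ) + 1 else 0) := by
  have : (0:ℤ) ≤ ((i - q : ℕ) : ℤ) := Int.natCast_nonneg _
  split <;> omega

-- the entries below q contribute nothing, the entry at q contributes 1
lemma pvr_piece1 (nums : List Int) (q : ℕ) :
    pvMx ((List.range (q + 1)).map
      (fun i => if q ≤ i ∧ pvSeg nums q i then ((i - q : ℕ) : ℤ) + 1 else 0)) = 1 := by
  rw [List.range_succ, List.map_append, pvMx_append, List.map_cons, List.map_nil,
    pvMx_cons, pvMx_nil]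
  rw [pvMx_eq_zero_of _ _ (fun i hi => by
    rw [List.mem_range] at hi
    rw [if_neg]; intro hc; omega)]
  rw [if_pos ⟨le_refl q, pvSeg_self nums q⟩]
  simp

lemma pvr_closed_aux (nums : List Int) (n : ℕ) (k : ℕ) : ∀ q, q < n → n - q ≤ k →
    pvMx ((List.range n).map (fun i =>
      if q ≤ i ∧ pvSeg nums q i then ((i - q : ℕ) : ℤ) + 1 else 0)) = pvr nums n q := by
  induction k with
  | zero => intro q hq hk; omega
  | succ k ih =>
    intro q hq hk
    rw [pvr]
    by_cases hc : q + 1 < n ∧ pva nums q ≤ pva nums (q + 1)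
    · rw [dif_pos hc]
      have hn : n = (q + 1) + (n - (q + 1)) := by omega
      conv_lhs => rw [hn, List.range_add]
      rw [List.map_append, pvMx_append, List.map_map, pvr_piece1]
      have hpt : ∀ j ∈ List.range (n - (q + 1)),
          ((fun i => if q ≤ i ∧ pvSeg nums q i = true then ((i - q : ℕ) : ℤ) + 1 else 0) ∘
            (fun x => q + 1 + x)) j =
          (fun j => if (if q + 1 ≤ q + 1 + j ∧ pvSeg nums (q + 1) (q + 1 + j) = true then
                ((q + 1 + j - (q + 1) : ℕ) : ℤ) + 1 else 0) = 0 then 0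
            else 1 + (if q + 1 ≤ q + 1 + j ∧ pvSeg nums (q + 1) (q + 1 + j) = true then
                ((q + 1 + j - (q + 1) : ℕ) : ℤ) + 1 else 0)) j := by
        intro j hj
        simp only [Function.comp_def]
        have hi1 : q + 1 ≤ q + 1 + j := by omega
        have hseg := pvSeg_bot nums q (q + 1 + j) hi1
        by_cases hs : pvSeg nums (q + 1) (q + 1 + j) = true
        · have hX : pvSeg nums q (q + 1 + j) = true := by
            rw [hseg, hs]; simp [hc.2]
          have hnz : ¬ ((if q + 1 ≤ q + 1 + j ∧ pvSeg nums (q + 1) (q + 1 + j) = true then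
              ((q + 1 + j - (q + 1) : ℕ) : ℤ) + 1 else 0) = 0) := by
            rw [if_pos (And.intro hi1 hs)]
            have : (0:ℤ) ≤ ((q + 1 + j - (q + 1) : ℕ) : ℤ) := Int.natCast_nonneg _
            omega
          rw [if_pos (And.intro (by omega : q ≤ q + 1 + j) hX), if_neg hnz,
            if_pos (And.intro hi1 hs)]
          have hiq : (q + 1 + j - q : ℕ) = (q + 1 + j - (q + 1) : ℕ) + 1 := by omega
          rw [hiq]; push_cast; ring
        · have hX : ¬ (q ≤ q + 1 + j ∧ pvSeg nums q (q + 1 + j) = true) := by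
            intro hh
            apply hs
            have h2 := hh.2
            rw [hseg] at h2
            simpa [hc.2] using h2
          have hz : (if q + 1 ≤ q + 1 + j ∧ pvSeg nums (q + 1) (q + 1 + j) = true then
              ((q + 1 + j - (q + 1) : ℕ) : ℤ) + 1 else 0) = 0 := by
            rw [if_neg (fun hh => hs hh.2)]
          rw [if_neg hX, hz, if_pos rfl]
      rw [List.map_congr_left hpt]
      have hz : pvMx ((List.range (n - (q + 1))).map (fun j =>
          if q + 1 ≤ q + 1 + j ∧ pvSeg nums (q + 1) (q + 1 + j) = true then
            ((q + 1 + j - (q + 1) : ℕ) : ℤ) + 1 else 0)) =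
          pvMx ((List.range n).map (fun i =>
            if q + 1 ≤ i ∧ pvSeg nums (q + 1) i = true then ((i - (q + 1) : ℕ) : ℤ) + 1 else 0)) := by
        have hz0 : pvMx ((List.range (q + 1)).map (fun i =>
            if q + 1 ≤ i ∧ pvSeg nums (q + 1) i = true then ((i - (q + 1) : ℕ) : ℤ) + 1 else 0)) = 0 := by
          apply pvMx_eq_zero_of
          intro i hi
          rw [List.mem_range] at hi
          exact if_neg (fun hh => absurd hh.1 (by omega))
        conv_rhs => rw [hn, List.range_add]
        rw [List.map_append, pvMx_append, List.map_map, hz0]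
        simp only [Function.comp_def]
        rw [max_eq_right (pvMx_nonneg _)]
      rw [pvMx_bump (List.range (n - (q + 1)))
        (fun j => if q + 1 ≤ q + 1 + j ∧ pvSeg nums (q + 1) (q + 1 + j) = true then
          ((q + 1 + j - (q + 1) : ℕ) : ℤ) + 1 else 0) 1 (by omega)
        (fun j _ => pvt_nonneg nums (q + 1) (q + 1 + j)), hz,
        ih (q + 1) (by omega) (by omega)]
      have hr1 := pvr_pos nums n (q + 1)
      rw [if_neg (by omega)]
      omega
    · rw [dif_neg hc]
      rw [pvMx_extend _ (q + 1) n (by omega) (fun i hi1 hi2 => by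
        rw [if_neg]
        intro hcc
        have hiq : q + 1 ≤ i := hi1
        have hseg := pvSeg_bot nums q i hiq
        rw [hseg] at hcc
        have := hcc.2
        simp only [Bool.and_eq_true, decide_eq_true_eq] at this
        exact hc ⟨by omega, this.1⟩)]
      exact pvr_piece1 nums q

lemma pvr_closed (nums : List Int) (n q : ℕ) (hq : q < n) :
    pvMx ((List.range n).map (fun i =>
      if q ≤ i ∧ pvSeg nums q i then ((i - q : ℕ) : ℤ) + 1 else 0)) = pvr nums n q :=
  pvr_closed_aux nums n (n - q) q hq (le_refl _)

-- A's bridge candidate = max over i of the family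
lemma pvb_closed (nums : List Int) (n p : ℕ) :
    pvMx ((List.range n).map (fun i => pvh nums n p i)) = pvb nums n p := by
  by_cases hv : 1 ≤ p ∧ p + 1 < n ∧ pva nums (p - 1) ≤ pva nums (p + 1)
  · rw [pvb, if_pos hv]
    have hpt : ∀ i ∈ List.range n, pvh nums n p i =
        (fun i => if (if p + 1 ≤ i ∧ pvSeg nums (p + 1) i = true then
              ((i - (p + 1) : ℕ) : ℤ) + 1 else 0) = 0 then 0
          else (pvf nums (p - 1) + 1) + (if p + 1 ≤ i ∧ pvSeg nums (p + 1) i = true then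
              ((i - (p + 1) : ℕ) : ℤ) + 1 else 0)) i := by
      intro i hi
      rw [List.mem_range] at hi
      by_cases hs : p + 1 ≤ i ∧ pvSeg nums (p + 1) i = true
      · have hnz : ¬ ((if p + 1 ≤ i ∧ pvSeg nums (p + 1) i = true then
            ((i - (p + 1) : ℕ) : ℤ) + 1 else 0) = 0) := by
          rw [if_pos hs]
          have : (0:ℤ) ≤ ((i - (p + 1) : ℕ) : ℤ) := Int.natCast_nonneg _
          omega
        dsimp only
        rw [if_neg hnz, if_pos hs, pvh, if_pos (And.intro hv.1 (And.intro hs.1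
          (And.intro hi (And.intro hv.2.2 hs.2))))]
        have hiq : (i - p : ℕ) = (i - (p + 1) : ℕ) + 1 := by omega
        rw [hiq]; push_cast; ring
      · have hz : (if p + 1 ≤ i ∧ pvSeg nums (p + 1) i = true then
            ((i - (p + 1) : ℕ) : ℤ) + 1 else 0) = 0 := if_neg hs
        dsimp only
        rw [pvh, if_neg (fun hh => hs (And.intro hh.2.1 hh.2.2.2.2)), hz, if_pos rfl]
    rw [List.map_congr_left hpt]
    have hC : (0:ℤ) ≤ pvf nums (p - 1) + 1 := by have := pvf_pos nums (p - 1); omega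
    rw [pvMx_bump (List.range n)
      (fun i => if p + 1 ≤ i ∧ pvSeg nums (p + 1) i = true then
        ((i - (p + 1) : ℕ) : ℤ) + 1 else 0) (pvf nums (p - 1) + 1) hC
      (fun i _ => pvt_nonneg nums (p + 1) i),
      pvr_closed nums n (p + 1) (by omega)]
    have hr1 := pvr_pos nums n (p + 1)
    rw [if_neg (by omega)]
    omega
  · rw [pvb, if_neg hv]
    apply pvMx_eq_zero_of
    intro i hi
    rw [List.mem_range] at hi
    rw [pvh, if_neg]
    intro hh
    exact hv (And.intro hh.1 (And.intro (by omega) hh.2.2.2.1))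

-- the central identity: the maxima of the two loop families agree
lemma pv_core (nums : List Int) (n : ℕ) :
    pvMx ((List.range n).map (pvg nums)) = pvMx ((List.range n).map (pvb nums n)) := by
  rw [List.map_congr_left (fun i hi => pvg_closed nums n i (List.mem_range.mp hi))]
  have hext : ∀ i ∈ List.range n,
      (fun i => pvMx ((List.range i).map (fun p => pvh nums n p i))) i =
      (fun i => pvMx ((List.range n).map (fun p => pvh nums n p i))) i := by
    intro i hi
    rw [List.mem_range] at hi
    exact (pvMx_extend (fun p => pvh nums n p i) i n (le_of_lt hi)
      (fun p hp1 _ => by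
        show pvh nums n p i = 0
        rw [pvh, if_neg (fun hh => absurd hh.2.1 (by omega))])).symm
  rw [List.map_congr_left hext,
    ← pvMx_swap (List.range n) (List.range n) (fun p i => pvh nums n p i),
    List.map_congr_left (fun p _ => pvb_closed nums n p)]

lemma pva_eq (nums : List Int) (k : ℕ) : nums.getD k 0 = pva nums k := rfl

lemma pvMx_snoc (l : List ℤ) (x : ℤ) (hx : 0 ≤ x) : pvMx (l ++ [x]) = max (pvMx l) x := by
  rw [pvMx_append, pvMx_cons, pvMx_nil]
  omega

lemma set_map_range (f : ℕ → ℤ) (L k : ℕ) (v : ℤ) :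
    ((List.range L).map f).set k v =
      (List.range L).map (fun j => if j = k then v else f j) := by
  apply List.ext_getElem
  · simp
  · intro i h1 h2
    simp only [List.getElem_set, List.getElem_map, List.getElem_range]
    by_cases hik : i = k
    · subst hik; simp
    · rw [if_neg (fun hh => hik hh.symm), if_neg hik]

lemma getD_map_range (f : ℕ → ℤ) (L k : ℕ) (hk : k < L) :
    ((List.range L).map f).getD k 0 = f k := by
  rw [List.getD_eq_getElem?_getD, List.getElem?_map, List.getElem?_range hk]
  rfl

-- one step of A's left loop, at index m = t+1
lemma A_left_step (nums : List Int) (t : ℕ) (ht : t + 1 < nums.length) :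
    (if PySem.List.pyGetD nums (((t + 1 : ℕ) : Int)) 0 ≥
        PySem.List.pyGetD nums (((t + 1 : ℕ) : Int) - 1) 0 then
      PySem.List.pySetD
        ((List.range nums.length).map (fun j => if j < t + 1 then pvf nums j else 1))
        (((t + 1 : ℕ) : Int))
        (PySem.List.pyGetD
          ((List.range nums.length).map (fun j => if j < t + 1 then pvf nums j else 1))
          (((t + 1 : ℕ) : Int) - 1) 0 + 1)
    else (List.range nums.length).map (fun j => if j < t + 1 then pvf nums j else 1)) =
    (List.range nums.length).map (fun j => if j < t + 2 then pvf nums j else 1) := by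
  have e1 : ((t + 1 : ℕ) : Int) - 1 = ((t : ℕ) : Int) := by omega
  rw [e1]
  simp only [PySem.List.pyGetD_natCast, ge_iff_le, PySem.List.pySetD_natCast]
  rw [getD_map_range _ _ t (by omega), if_pos (by omega : t < t + 1)]
  simp only [pva_eq]
  have ef : pvf nums (t + 1) = if pva nums t ≤ pva nums (t + 1) then pvf nums t + 1 else 1 := by
    rw [pvf]
  by_cases hc : pva nums t ≤ pva nums (t + 1)
  · rw [if_pos hc, set_map_range]
    apply List.map_congr_left
    intro j hj
    by_cases hjt : j = t + 1
    · subst hjt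
      rw [if_pos rfl, if_pos (by omega), ef, if_pos hc]
    · rw [if_neg hjt]
      by_cases hjlt : j < t + 1
      · rw [if_pos hjlt, if_pos (by omega)]
      · rw [if_neg hjlt, if_neg (by omega)]
  · rw [if_neg hc]
    apply List.map_congr_left
    intro j hj
    by_cases hjt : j = t + 1
    · subst hjt
      rw [if_neg (by omega), if_pos (by omega), ef, if_neg hc]
    · by_cases hjlt : j < t + 1
      · rw [if_pos hjlt, if_pos (by omega)]
      · rw [if_neg hjlt, if_neg (by omega)]

-- A's left loop computes pvf
lemma A_left_aux (nums : List Int) (k : ℕ) : ∀ m, 1 ≤ m → m ≤ nums.length →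
    nums.length - m ≤ k →
    (PySem.List.pyRange ((m : ℕ) : Int) ((nums.length : ℕ) : Int) 1).foldl
      (fun (left : List Int) (i : Int) =>
        if PySem.List.pyGetD nums i 0 ≥ PySem.List.pyGetD nums (i - 1) 0 then
          PySem.List.pySetD left i (PySem.List.pyGetD left (i - 1) 0 + 1)
        else left)
      ((List.range nums.length).map (fun j => if j < m then pvf nums j else 1)) =
    (List.range nums.length).map (pvf nums) := by
  induction k with
  | zero =>
    intro m h1 hm hk
    have hme : m = nums.length := by omega
    subst hme
    rw [PySem.List.pyRange_one_eq_nil (le_refl _), List.foldl_nil]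
    exact List.map_congr_left (fun j hj => if_pos (List.mem_range.mp hj))
  | succ k ih =>
    intro m h1 hm hk
    rcases Nat.eq_or_lt_of_le hm with he | hlt
    · subst he
      rw [PySem.List.pyRange_one_eq_nil (le_refl _), List.foldl_nil]
      exact List.map_congr_left (fun j hj => if_pos (List.mem_range.mp hj))
    · obtain ⟨t, rfl⟩ : ∃ t, m = t + 1 := ⟨m - 1, by omega⟩
      rw [PySem.List.pyRange_one_cons (by exact_mod_cast hlt), List.foldl_cons]
      have hstep := A_left_step nums t hlt
      rw [hstep]
      have hc : ((t + 1 : ℕ) : Int) + 1 = ((t + 2 : ℕ) : Int) := by omega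
      rw [hc]
      exact ih (t + 2) (by omega) (by omega) (by omega)

-- one step of A's right loop, at index q
lemma A_right_step (nums : List Int) (q : ℕ) (hq : q + 1 < nums.length) :
    (if PySem.List.pyGetD nums ((q : ℕ) : Int) 0 ≤
        PySem.List.pyGetD nums (((q : ℕ) : Int) + 1) 0 then
      PySem.List.pySetD
        ((List.range nums.length).map
          (fun j => if q + 1 ≤ j then pvr nums nums.length j else 1))
        ((q : ℕ) : Int)
        (PySem.List.pyGetD
          ((List.range nums.length).map
            (fun j => if q + 1 ≤ j then pvr nums nums.length j else 1))
          (((q : ℕ) : Int) + 1) 0 + 1)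
    else (List.range nums.length).map
      (fun j => if q + 1 ≤ j then pvr nums nums.length j else 1)) =
    (List.range nums.length).map (fun j => if q ≤ j then pvr nums nums.length j else 1) := by
  have e1 : ((q : ℕ) : Int) + 1 = ((q + 1 : ℕ) : Int) := by omega
  rw [e1]
  simp only [PySem.List.pyGetD_natCast, PySem.List.pySetD_natCast]
  rw [getD_map_range _ _ (q + 1) (by omega), if_pos (le_refl _)]
  simp only [pva_eq]
  have er : pvr nums nums.length q =
      if q + 1 < nums.length ∧ pva nums q ≤ pva nums (q + 1) then
        pvr nums nums.length (q + 1) + 1 else 1 := by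
    rw [pvr]
    split_ifs <;> rfl
  by_cases hc : pva nums q ≤ pva nums (q + 1)
  · rw [if_pos hc, set_map_range]
    apply List.map_congr_left
    intro j hj
    by_cases hjq : j = q
    · subst hjq
      rw [if_pos rfl, if_pos (le_refl _), er, if_pos (And.intro hq hc)]
    · rw [if_neg hjq]
      by_cases hjge : q + 1 ≤ j
      · rw [if_pos hjge, if_pos (by omega)]
      · rw [if_neg hjge, if_neg (by omega)]
  · rw [if_neg hc]
    apply List.map_congr_left
    intro j hj
    by_cases hjq : j = q
    · subst hjq
      rw [if_neg (by omega), if_pos (le_refl _), er,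
        if_neg (fun hh => hc hh.2)]
    · by_cases hjge : q + 1 ≤ j
      · rw [if_pos hjge, if_pos (by omega)]
      · rw [if_neg hjge, if_neg (by omega)]

-- A's right loop computes pvr
lemma A_right_aux (nums : List Int) (a : ℕ) (ha : a + 1 < nums.length) :
    (PySem.List.pyRange ((a : ℕ) : Int) (-1) (-1)).foldl
      (fun (right : List Int) (i : Int) =>
        if PySem.List.pyGetD nums i 0 ≤ PySem.List.pyGetD nums (i + 1) 0 then
          PySem.List.pySetD right i (PySem.List.pyGetD right (i + 1) 0 + 1)
        else right)
      ((List.range nums.length).map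
        (fun j => if a + 1 ≤ j then pvr nums nums.length j else 1)) =
    (List.range nums.length).map (fun j => pvr nums nums.length j) := by
  induction a with
  | zero =>
    rw [PySem.List.pyRange_neg_one_cons (by omega), List.foldl_cons,
      A_right_step nums 0 ha,
      show (((0 : ℕ) : Int) - 1) = (-1 : Int) from by norm_num,
      PySem.List.pyRange_neg_one_eq_nil (le_refl _), List.foldl_nil]
    exact List.map_congr_left (fun j _ => if_pos (Nat.zero_le j))
  | succ a iha =>
    rw [PySem.List.pyRange_neg_one_cons (by omega), List.foldl_cons,
      A_right_step nums (a + 1) ha]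
    have hc : ((a + 1 : ℕ) : Int) - 1 = ((a : ℕ) : Int) := by omega
    rw [hc]
    exact iha (by omega)

-- a loop 'if c: acc = max(acc, v)' is max of the if-family
lemma foldl_max_if {α : Type} (l : List α) (c : α → Prop) [DecidablePred c] (v : α → ℤ)
    (init : ℤ) (h0 : 0 ≤ init) :
    l.foldl (fun acc x => if c x then max acc (v x) else acc) init =
      max init (pvMx (l.map (fun x => if c x then v x else 0))) := by
  induction l generalizing init with
  | nil =>
    rw [List.foldl_nil, List.map_nil, pvMx_nil, max_eq_left h0]
  | cons x t ih =>
    rw [List.foldl_cons, List.map_cons, pvMx_cons]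
    by_cases hc : c x
    · rw [if_pos hc, if_pos hc, ih (max init (v x)) (by omega), max_assoc]
    · rw [if_neg hc, if_neg hc, ih init h0, max_eq_right (pvMx_nonneg _)]

lemma foldl_congr_mem' {α β : Type} (l : List α) (f g : β → α → β) (init : β)
    (h : ∀ b, ∀ x ∈ l, f b x = g b x) : l.foldl f init = l.foldl g init := by
  induction l generalizing init with
  | nil => rfl
  | cons x t ih =>
    rw [List.foldl_cons, List.foldl_cons, h init x (List.mem_cons_self)]
    exact ih _ (fun b y hy => h b y (List.mem_cons_of_mem _ hy))

-- A computes max over the bridge family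
lemma portA_eq (nums : List Int) (h2 : 2 ≤ nums.length) :
    longestNonDecreasing nums =
      (let n : ℤ := nums.length
       let M := pvMx ((List.range nums.length).map (pvf nums))
       let M' := if M ≠ n then M + 1 else M
       max M' (pvMx ((List.range nums.length).map (pvb nums nums.length)))) := by
  have hne1 : ¬ ((nums.length : Int) = 1) := by omega
  simp only [longestNonDecreasing, PySem.List.len_eq, PySem.List.pyRepeat_singleton,
    Int.toNat_natCast]
  rw [if_neg hne1]
  -- the left loop computes pvf
  have hrepL : List.replicate nums.length (1:ℤ) =
      (List.range nums.length).map (fun j => if j < 1 then pvf nums j else 1) := by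
    symm
    apply List.eq_replicate_iff.mpr
    refine ⟨by simp, ?_⟩
    intro b hb
    simp only [List.mem_map, List.mem_range] at hb
    obtain ⟨j, _, rfl⟩ := hb
    by_cases hj : j < 1
    · have hj0 : j = 0 := by omega
      subst hj0
      rw [if_pos hj]
      rfl
    · rw [if_neg hj]
  have eleft : (PySem.List.pyRange 1 ((nums.length : ℕ) : Int) 1).foldl
      (fun (left : List Int) (i : Int) =>
        if PySem.List.pyGetD nums i 0 ≥ PySem.List.pyGetD nums (i - 1) 0 then
          PySem.List.pySetD left i (PySem.List.pyGetD left (i - 1) 0 + 1)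
        else left)
      (List.replicate nums.length (1:ℤ)) =
      (List.range nums.length).map (pvf nums) := by
    have h := A_left_aux nums (nums.length - 1) 1 (le_refl _) (by omega) (by omega)
    rw [Nat.cast_one] at h
    rw [hrepL]
    exact h
  rw [eleft]
  -- the right loop computes pvr
  have hrepR : List.replicate nums.length (1:ℤ) =
      (List.range nums.length).map
        (fun j => if (nums.length - 2) + 1 ≤ j then pvr nums nums.length j else 1) := by
    symm
    apply List.eq_replicate_iff.mpr
    refine ⟨by simp, ?_⟩
    intro b hb
    simp only [List.mem_map, List.mem_range] at hb
    obtain ⟨j, hj, rfl⟩ := hb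
    by_cases hge : (nums.length - 2) + 1 ≤ j
    · have hje : j = nums.length - 1 := by omega
      subst hje
      rw [if_pos hge, pvr, dif_neg (fun hh => absurd hh.1 (by omega))]
    · rw [if_neg hge]
  have ecast2 : (nums.length : Int) - 2 = ((nums.length - 2 : ℕ) : Int) := by omega
  have eright : (PySem.List.pyRange ((nums.length : Int) - 2) (-1) (-1)).foldl
      (fun (right : List Int) (i : Int) =>
        if PySem.List.pyGetD nums i 0 ≤ PySem.List.pyGetD nums (i + 1) 0 then
          PySem.List.pySetD right i (PySem.List.pyGetD right (i + 1) 0 + 1)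
        else right)
      (List.replicate nums.length (1:ℤ)) =
      (List.range nums.length).map (fun j => pvr nums nums.length j) := by
    rw [ecast2, hrepR]
    exact A_right_aux nums (nums.length - 2) (by omega)
  rw [eright]
  -- max(left)
  have hmax : (PySem.List.max? ((List.range nums.length).map (pvf nums)) (fun y => y)).getD 0
      = pvMx ((List.range nums.length).map (pvf nums)) := by
    obtain ⟨K, hK⟩ : ∃ K, nums.length = K + 1 := ⟨nums.length - 1, by omega⟩
    rw [hK, List.range_succ_eq_map, List.map_cons, PySem.List.max?_id_cons, Option.getD_some]
    have h1 : pvf nums 0 = max (pvf nums 0) 0 := by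
      have := pvf_pos nums 0
      omega
    conv_lhs => rw [h1]
    rw [foldl_max_init, pvMx_cons]
    rfl
  rw [hmax]
  -- the bridge loop
  have hM0 : (0:ℤ) ≤ pvMx ((List.range nums.length).map (pvf nums)) := pvMx_nonneg _
  have hM'0 : (0:ℤ) ≤ (if pvMx ((List.range nums.length).map (pvf nums)) ≠ (nums.length : Int)
      then pvMx ((List.range nums.length).map (pvf nums)) + 1
      else pvMx ((List.range nums.length).map (pvf nums))) := by
    split_ifs <;> omega
  have ecast3 : ((nums.length : Int) - 1 - 1).toNat = nums.length - 2 := by omega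
  rw [PySem.List.pyRange_one, ecast3, List.foldl_map]
  rw [foldl_congr_mem' (List.range (nums.length - 2)) _
    (fun (acc : ℤ) (k : ℕ) => if pva nums k ≤ pva nums (k + 2) then
      max acc (pvf nums k + pvr nums nums.length (k + 2) + 1) else acc) _ ?hbody]
  case hbody =>
    intro acc k hk
    rw [List.mem_range] at hk
    have ea : (1:Int) + (k : Int) - 1 = ((k : ℕ) : Int) := by omega
    have eb : (1:Int) + (k : Int) + 1 = ((k + 2 : ℕ) : Int) := by omega
    rw [ea, eb]
    simp only [PySem.List.pyGetD_natCast]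
    rw [getD_map_range _ _ k (by omega), getD_map_range _ _ (k + 2) (by omega)]
    simp only [pva_eq]
    rfl
  rw [foldl_max_if (List.range (nums.length - 2)) _ _ _ hM'0]
  -- identify the family with pvb over the full range
  have hXB : pvMx ((List.range nums.length).map (pvb nums nums.length)) =
      pvMx ((List.range (nums.length - 2)).map
        (fun k => if pva nums k ≤ pva nums (k + 2) then
          pvf nums k + pvr nums nums.length (k + 2) + 1 else 0)) := by
    rw [pvMx_extend (pvb nums nums.length) (nums.length - 1) nums.length (by omega)
      (fun p hp1 hp2 => by rw [pvb, if_neg (fun hh => absurd hh.2.1 (by omega))])]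
    have e4 : nums.length - 1 = (nums.length - 2) + 1 := by omega
    rw [e4, List.range_succ_eq_map, List.map_cons, pvMx_cons]
    have hb0 : pvb nums nums.length 0 = 0 := by
      rw [pvb, if_neg (fun hh => absurd hh.1 (by omega))]
    rw [hb0, List.map_map]
    rw [max_eq_right (pvMx_nonneg _)]
    apply congrArg
    apply List.map_congr_left
    intro k hk
    rw [List.mem_range] at hk
    simp only [Function.comp_def, Nat.succ_eq_add_one,
      show k + 1 + 1 = k + 2 from by omega]
    rw [pvb]
    by_cases hc : pva nums k ≤ pva nums (k + 2)
    · rw [if_pos, if_pos hc]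
      · rw [Nat.add_sub_cancel]
      · exact ⟨by omega, by omega, by rw [Nat.add_sub_cancel]; exact hc⟩
    · rw [if_neg, if_neg hc]
      intro hh
      exact hc (by have := hh.2.2; rwa [Nat.add_sub_cancel] at this)
  rw [hXB]

-- loop invariant for B's single pass
lemma B_inv (nums : List Int) (m : ℕ) (hm : m < nums.length) :
    (PySem.List.pyRange 1 ((1 + m : ℕ) : Int) 1).foldl
      (fun (st : Int × Int × Int × Int × Int) i =>
        let best := st.1
        let bestB := st.2.1
        let keep := st.2.2.1
        let keep_pp := st.2.2.2.1
        let brg := st.2.2.2.2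
        let p :=
          if PySem.List.pyGetD nums i 0 ≥ PySem.List.pyGetD nums (i - 1) 0 then
            (keep + 1, if brg ≠ 0 then brg + 1 else 0)
          else (1, 0)
        let brg2 :=
          if 2 ≤ i ∧ PySem.List.pyGetD nums (i - 2) 0 ≤ PySem.List.pyGetD nums i 0 then
            max p.2 (keep_pp + 2)
          else p.2
        (max best p.1, max bestB brg2, p.1, keep, brg2))
      ((1 : Int), (0 : Int), (1 : Int), (0 : Int), (0 : Int)) =
    (pvMx ((List.range (m + 1)).map (pvf nums)),
     pvMx ((List.range (m + 1)).map (pvg nums)),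
     pvf nums m,
     if m = 0 then 0 else pvf nums (m - 1),
     pvg nums m) := by
  induction m with
  | zero =>
    rw [PySem.List.pyRange_one_eq_nil (by norm_num)]
    simp [pvf, pvg, pvMx]
  | succ m ih =>
    have hml : m < nums.length := by omega
    have hcast : ((1 + (m + 1) : ℕ) : Int) = ((1 + m : ℕ) : Int) + 1 := by push_cast; ring
    rw [hcast, PySem.List.pyRange_one_succ_right (by push_cast; omega), List.foldl_append,
      ih hml]
    rw [List.foldl_cons, List.foldl_nil]
    dsimp only
    have e1 : ((1 + m : ℕ) : Int) - 1 = ((m : ℕ) : Int) := by push_cast; ring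
    rw [e1]
    simp only [PySem.List.pyGetD_natCast, pva_eq, ge_iff_le]
    have ef : pvf nums (m + 1) = if pva nums m ≤ pva nums (m + 1) then pvf nums m + 1 else 1 := by
      rw [pvf]
    have eg : pvg nums (m + 1) =
        if 1 ≤ m ∧ pva nums (m - 1) ≤ pva nums (m + 1) then
          max (if pva nums m ≤ pva nums (m + 1) ∧ pvg nums m ≠ 0 then pvg nums m + 1 else 0)
            (pvf nums (m - 1) + 2)
        else
          (if pva nums m ≤ pva nums (m + 1) ∧ pvg nums m ≠ 0 then pvg nums m + 1 else 0) := by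
      rw [pvg]
    have hrs : List.range (m + 1 + 1) = List.range (m + 1) ++ [m + 1] := List.range_succ
    have h1 : pvMx ((List.range (m + 1 + 1)).map (pvf nums)) =
        max (pvMx ((List.range (m + 1)).map (pvf nums))) (pvf nums (m + 1)) := by
      rw [hrs, List.map_append, List.map_cons, List.map_nil,
        pvMx_snoc _ _ (by have := pvf_pos nums (m + 1); omega)]
    have h2 : pvMx ((List.range (m + 1 + 1)).map (pvg nums)) =
        max (pvMx ((List.range (m + 1)).map (pvg nums))) (pvg nums (m + 1)) := by
      rw [hrs, List.map_append, List.map_cons, List.map_nil,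
        pvMx_snoc _ _ (pvg_nonneg nums (m + 1))]
    rw [h1, h2, ef, eg]
    simp only [Nat.add_comm 1 m]
    by_cases hbr : 1 ≤ m
    · have e2 : (m : ℤ) - 1 = ((m - 1 : ℕ) : Int) := by omega
      have e2a : (m : ℤ) + 1 - 2 = ((m - 1 : ℕ) : Int) := by omega
      have h2le : (2:ℤ) ≤ (m : ℤ) + 1 := by omega
      have hm0 : ¬ (m = 0) := by omega
      have e2b : ((m + 1 : ℕ) : Int) - 2 = ((m - 1 : ℕ) : Int) := by omega
      have h2le2 : (2:ℤ) ≤ ((m + 1 : ℕ) : Int) := by omega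
      have hms : ¬ (m + 1 = 0) := by omega
      have hpf1 := pvf_pos nums m
      have hpf2 := pvf_pos nums (m - 1)
      have hpg := pvg_nonneg nums m
      by_cases hg0 : pvg nums m = 0 <;>
        by_cases hcur : pva nums m ≤ pva nums (m + 1) <;>
        by_cases hbc : pva nums (m - 1) ≤ pva nums (m + 1) <;>
        simp only [e2b, hg0, hcur, hbc, hbr, h2le2, hm0, hms,
          PySem.List.pyGetD_natCast,
          pva_eq, ge_iff_le, Prod.mk.injEq, ne_eq, not_true, not_false_iff, and_true,
          and_false, true_and, false_and, and_self, if_true, if_false,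
          eq_self_iff_true, iff_true, iff_false, not_le, Nat.add_sub_cancel] <;>
        split_ifs <;> omega
    · have hm0 : m = 0 := by omega
      subst hm0
      have hg00 : pvg nums 0 = 0 := rfl
      have hf0 : pvf nums 0 = 1 := rfl
      have hf1 : pvf nums (0 + 1 - 1) = 1 := rfl
      have hMf : pvMx ((List.range (0 + 1)).map (pvf nums)) = 1 := by
        simp [pvMx, pvf]
      have hMg : pvMx ((List.range (0 + 1)).map (pvg nums)) = 0 := by
        simp [pvMx, pvg]
      have h2n : ¬ ((2:ℤ) ≤ ((0 + 1 : ℕ) : Int)) := by norm_num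
      rw [hg00]
      simp only [PySem.List.pyGetD_natCast, pva_eq, hf0, hf1, hMf, hMg, h2n, ge_iff_le,
        Prod.mk.injEq, ne_eq, not_true, not_false_iff, and_true, and_false, true_and,
        false_and, if_false, eq_self_iff_true]
      split_ifs <;> first | exact (‹False›).elim | omega

-- B computes max over the g family
lemma portB_eq (nums : List Int) (h2 : 2 ≤ nums.length) :
    longestNonDecreasing_alt nums =
      (let n : ℤ := nums.length
       let M := pvMx ((List.range nums.length).map (pvf nums))
       let M' := if M ≠ n then M + 1 else M
       max M' (pvMx ((List.range nums.length).map (pvg nums)))) := by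
  have hlen : (PySem.List.len nums) = (nums.length : Int) := by simp [PySem.List.len_eq]
  simp only [longestNonDecreasing_alt, hlen]
  rw [if_neg (by omega : ¬ (nums.length : Int) = 0)]
  have hc : (nums.length : Int) = ((1 + (nums.length - 1) : ℕ) : Int) := by omega
  rw [hc, B_inv nums (nums.length - 1) (by omega)]
  have hc2 : nums.length - 1 + 1 = nums.length := by omega
  rw [hc2]
  all_goals dsimp only
  all_goals try rw [← hc]
  all_goals try rfl

-- ===== VERDICT (by name: the statement is the Claim_ definition above) =====
theorem longestNonDecreasing_spec : Claim_equal_longestNonDecreasing := by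
  intro nums _ hpre
  unfold Spec_longestNonDecreasing
  rcases Nat.lt_or_ge nums.length 2 with h1 | h2
  · match nums, hpre with
    | [x], _ =>
      simp [longestNonDecreasing, longestNonDecreasing_alt, PySem.List.len,
        PySem.List.pyRange_one_eq_nil]
  · rw [portA_eq nums h2, portB_eq nums h2, pv_core nums nums.length]
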